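-- pv_equiv track=rewrite | github.com/1r0nw1ll/quantum-arithmetic-research | qa_alphageometry_ptolemy/qa_dead_reckoning_cert_v1/qa_dead_reckoning_cert_validate.py | classify_orbit_mod24
-- ===== SOURCE A (Python) =====
-- def t_operator(b, e, m):
--     """Single QA T-operator step: (b,e) -> (e, b+e) mod m, A1 compliant."""
--     new_b = ((e - 1) % m) + 1
--     new_e = (((b + e) - 1) % m) + 1
--     return new_b, new_e
--
-- def classify_orbit_mod24(state_b, state_e):
--     """Classify (b,e) into cosmos/satellite/singularity under mod-24."""
--     m = 24
--     b = ((state_b - 1) % m) + 1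
--     e = ((state_e - 1) % m) + 1
--     # Iterate to find orbit period
--     seen = set()
--     cur_b, cur_e = b, e
--     for step in range(25):
--         if (cur_b, cur_e) in seen:
--             period = step
--             break
--         seen.add((cur_b, cur_e))
--         cur_b, cur_e = t_operator(cur_b, cur_e, m)
--     else:
--         period = 25  # shouldn't happen for mod-24
--
--     if period == 1:
--         return "singularity"
--     elif period <= 8:
--         return "satellite"
--     else:
--         return "cosmos"
-- ===== SOURCE B (Python) =====
-- def classify_orbit_mod24(state_b, state_e):
--     """Classify (b,e) into cosmos/satellite/singularity under mod-24."""
--     m = 24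
--     b = ((state_b - 1) % m) + 1
--     e = ((state_e - 1) % m) + 1
--     # The T-operator is a bijection mod m, so the first repeated state is the
--     # start: count steps until (cur_b, cur_e) returns to (b, e), capped at 25.
--     cur_b = ((e - 1) % m) + 1
--     cur_e = (((b + e) - 1) % m) + 1
--     period = 1
--     while period < 25 and (cur_b, cur_e) != (b, e):
--         cur_b, cur_e = ((cur_e - 1) % m) + 1, (((cur_b + cur_e) - 1) % m) + 1
--         period += 1
--     if period == 1:
--         return "singularity"
--     elif period <= 8:
--         return "satellite"
--     else:
--         return "cosmos"
-- ===== Notes on version B (the rewrite author's own statement) =====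
-- stated objective: simpler
-- what changed: Replaces A's accumulated visited-set (set membership each step) with a plain counter loop that iterates the T-operator until the state first returns to its start (valid because the mod-24 T-operator is a bijection, so the first repeat is the start), capped at 25 steps; no set is maintained.
import Mathlib
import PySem

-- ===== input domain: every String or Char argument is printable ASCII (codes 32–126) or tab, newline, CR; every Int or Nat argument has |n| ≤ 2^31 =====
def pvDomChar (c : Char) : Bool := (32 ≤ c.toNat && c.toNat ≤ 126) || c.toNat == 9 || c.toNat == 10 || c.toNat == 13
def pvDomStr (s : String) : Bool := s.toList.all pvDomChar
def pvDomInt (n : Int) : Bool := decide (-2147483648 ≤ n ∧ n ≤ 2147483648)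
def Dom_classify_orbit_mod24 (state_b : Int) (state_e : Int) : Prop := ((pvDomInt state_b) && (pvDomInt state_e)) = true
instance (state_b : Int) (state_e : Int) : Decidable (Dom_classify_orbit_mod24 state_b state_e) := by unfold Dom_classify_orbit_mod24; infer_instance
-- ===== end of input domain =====

-- B replaces A's accumulated visited-set by counting steps until the T-orbit first returns to
-- its start state (valid because the T-operator is a bijection); objective: simpler.

-- ===== PORT A =====
def t_operator (b : Int) (e : Int) (m : Int) : Int × Int :=
  (PySem.Int.mod (e - 1) m + 1, PySem.Int.mod (b + e - 1) m + 1)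

-- A's `for step in range(25)` loop with break/else, carrying the `seen` set.
def pvALoop : Nat → Int → PySem.Set (Int × Int) → Int → Int → Int
  | 0, _, _, _, _ => 25
  | fuel + 1, step, seen, cur_b, cur_e =>
    if PySem.Set.contains seen (cur_b, cur_e) then step
    else
      let next := t_operator cur_b cur_e 24
      pvALoop fuel (step + 1) (PySem.Set.add seen (cur_b, cur_e)) next.1 next.2

def classify_orbit_mod24 (state_b : Int) (state_e : Int) : String :=
  let m : Int := 24
  let b := PySem.Int.mod (state_b - 1) m + 1
  let e := PySem.Int.mod (state_e - 1) m + 1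
  let period := pvALoop 25 0 PySem.Set.empty b e
  if period = 1 then "singularity"
  else if period ≤ 8 then "satellite"
  else "cosmos"

-- ===== PORT B =====
-- B's `while period < 25 and (cur_b,cur_e) != (b,e)` loop (fuel 25 bounds the counter).
def pvBLoop : Nat → Int → Int × Int → Int × Int → Int
  | 0, period, _, _ => period
  | fuel + 1, period, start, cur =>
    if period < 25 ∧ cur ≠ start then
      pvBLoop fuel (period + 1) start
        (PySem.Int.mod (cur.2 - 1) 24 + 1, PySem.Int.mod (cur.1 + cur.2 - 1) 24 + 1)
    else period

def classify_orbit_mod24_alt (state_b : Int) (state_e : Int) : String :=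
  let m : Int := 24
  let b := PySem.Int.mod (state_b - 1) m + 1
  let e := PySem.Int.mod (state_e - 1) m + 1
  let cur_b := PySem.Int.mod (e - 1) m + 1
  let cur_e := PySem.Int.mod (b + e - 1) m + 1
  let period := pvBLoop 25 1 (b, e) (cur_b, cur_e)
  if period = 1 then "singularity"
  else if period ≤ 8 then "satellite"
  else "cosmos"

-- ===== PRECONDITION & SPEC =====
def Spec_classify_orbit_mod24 (state_b : Int) (state_e : Int) (out : String) : Prop := out = classify_orbit_mod24_alt state_b state_e
instance (state_b : Int) (state_e : Int) (out : String) : Decidable (Spec_classify_orbit_mod24 state_b state_e out) := by unfold Spec_classify_orbit_mod24; infer_instance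

-- ===== CLAIM (what is proved, stated in full; the proofs are below) =====
def Claim_equal_classify_orbit_mod24 : Prop := ∀ (state_b : Int) (state_e : Int), Dom_classify_orbit_mod24 state_b state_e → Spec_classify_orbit_mod24 state_b state_e (classify_orbit_mod24 state_b state_e)

-- ===== LEMMAS AND PROOFS =====

-- The T-step as a map on state pairs (proof-side abbreviation; defeq to both loops' steps).
def pvT (p : Int × Int) : Int × Int :=
  (PySem.Int.mod (p.2 - 1) 24 + 1, PySem.Int.mod (p.1 + p.2 - 1) 24 + 1)

-- Normalized states: both components in [1, 24].
def pvInR (p : Int × Int) : Prop := 1 ≤ p.1 ∧ p.1 ≤ 24 ∧ 1 ≤ p.2 ∧ p.2 ≤ 24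

theorem pv_mod_emod (a : Int) : PySem.Int.mod a 24 = a % 24 :=
  PySem.Int.mod_eq_emod_of_pos (by norm_num)

theorem pvT_inR (p : Int × Int) : pvInR (pvT p) := by
  simp only [pvT, pvInR, pv_mod_emod]
  omega

theorem pvT_inj {p q : Int × Int} (hp : pvInR p) (hq : pvInR q) (h : pvT p = pvT q) : p = q := by
  obtain ⟨a, b⟩ := p
  obtain ⟨c, d⟩ := q
  simp only [pvT, pvInR, pv_mod_emod, Prod.mk.injEq] at hp hq h ⊢
  omega

-- On a nodup T-chain starting at `start`, the only previously seen state the current state can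
-- equal is the start (first repeat = start, since T is injective).
theorem pv_mem_start {seen : List (Int × Int)} {start cur : Int × Int}
    (hhead : seen.head? = some start) (hnd : seen.Nodup)
    (hR : ∀ q ∈ seen, pvInR q)
    (hch : List.IsChain (fun p q => pvT p = q) (seen ++ [cur]))
    (hmem : cur ∈ seen) : cur = start := by
  obtain ⟨j, hj, hje⟩ := List.getElem_of_mem hmem
  have hc := (List.isChain_iff_getElem.mp hch)
  have hL : 1 ≤ seen.length := List.length_pos_iff.mpr (by rintro rfl; simp at hmem)
  cases j with
  | zero =>
    rw [← hje]
    cases seen with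
    | nil => simp at hmem
    | cons s0 rest => simpa using hhead
  | succ j' =>
    exfalso
    -- chain link into position j'+1 of seen
    have h1 := hc j' (by rw [List.length_append, List.length_singleton]; omega)
    -- final chain link into cur
    have h2 := hc (seen.length - 1) (by rw [List.length_append, List.length_singleton]; omega)
    simp only [show seen.length - 1 + 1 = seen.length from by omega] at h2
    rw [List.getElem_append_left (by omega), List.getElem_append_left (by omega), hje] at h1
    rw [List.getElem_append_left (by omega)] at h2
    have h3 : (seen ++ [cur])[seen.length]'(by simp) = cur := by
      simp
    rw [h3] at h2
    have heq : seen[j']'(by omega) = seen[seen.length - 1]'(by omega) :=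
      pvT_inj (hR _ (List.getElem_mem _)) (hR _ (List.getElem_mem _)) (h1.trans h2.symm)
    have := (List.Nodup.getElem_inj_iff hnd).mp heq
    omega

-- Core loop equivalence: with the seen-list a nodup T-chain of length k from `start` and the
-- current state one T-step past its end, A's set loop and B's return-to-start loop agree.
theorem pv_loop_eq : ∀ (n k : Nat) (seen : List (Int × Int)) (start cur : Int × Int),
    n + k = 25 → 1 ≤ k →
    seen.length = k →
    seen.head? = some start →
    seen.Nodup →
    (∀ q ∈ seen, pvInR q) → pvInR cur →
    List.IsChain (fun p q => pvT p = q) (seen ++ [cur]) →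
    pvALoop n (k : Int) seen cur.1 cur.2 = pvBLoop (n + 1) (k : Int) start cur := by
  intro n
  induction n with
  | zero =>
    intro k seen start cur hnk hk1 _ _ _ _ _ _
    have hk : k = 25 := by omega
    subst hk
    simp [pvALoop, pvBLoop]
  | succ n ih =>
    intro k seen start cur hnk hk1 hlen hhead hnd hR hcur hch
    obtain ⟨c1, c2⟩ := cur
    have hmem_iff : (c1, c2) ∈ seen ↔ (c1, c2) = start := by
      constructor
      · exact fun h => pv_mem_start hhead hnd hR hch h
      · rintro rfl
        exact List.mem_of_mem_head? hhead
    by_cases hs : (c1, c2) = start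
    · -- current state is the start: A's membership test and B's guard both fire
      have hmem : (c1, c2) ∈ seen := hmem_iff.mpr hs
      show pvALoop (n + 1) (k : Int) seen c1 c2 = pvBLoop (n + 2) (k : Int) start (c1, c2)
      rw [pvALoop, pvBLoop]
      rw [show PySem.Set.contains seen (c1, c2) = true from (PySem.Set.contains_iff _ _).mpr hmem]
      simp [hs]
    · -- current state unseen: both loops advance by one T-step
      have hmem : (c1, c2) ∉ seen := fun h => hs (hmem_iff.mp h)
      show pvALoop (n + 1) (k : Int) seen c1 c2 = pvBLoop (n + 2) (k : Int) start (c1, c2)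
      rw [pvALoop, pvBLoop]
      have hcont : PySem.Set.contains seen (c1, c2) = false := by
        cases h : PySem.Set.contains seen (c1, c2)
        · rfl
        · exact absurd ((PySem.Set.contains_iff _ _).mp h) hmem
      rw [hcont]
      have hk25 : (k : Int) < 25 := by omega
      simp only [Bool.false_eq_true, if_false, hk25, hs, ne_eq, not_false_iff, and_self, if_true]
      have hstep : t_operator c1 c2 24 = pvT (c1, c2) := rfl
      have hgoal := ih (k + 1) (seen ++ [(c1, c2)]) start (pvT (c1, c2))
        (by omega) (by omega)
        (by simp [hlen])
        (by cases seen with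
            | nil => simp at hlen; omega
            | cons s0 rest => simpa using hhead)
        (by refine List.Nodup.append hnd (List.nodup_singleton _) ?_
            intro x hx hy
            simp at hy
            subst hy
            exact hmem hx)
        (by intro q hq
            rcases List.mem_append.mp hq with h | h
            · exact hR q h
            · simp at h; subst h; exact hcur)
        (pvT_inR _)
        (by refine List.IsChain.append hch (List.isChain_singleton _) ?_
            intro x hx y hy
            simp at hx hy
            subst hx
            subst hy
            rfl)
      rw [PySem.Set.add_of_not_mem hmem]
      push_cast at hgoal ⊢
      exact hgoal

-- ===== VERDICT (by name: the statement is the Claim_ definition above) =====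
theorem classify_orbit_mod24_spec : Claim_equal_classify_orbit_mod24 := by
  intro sb se _
  unfold Spec_classify_orbit_mod24
  simp only [classify_orbit_mod24, classify_orbit_mod24_alt]
  set b := PySem.Int.mod (sb - 1) 24 + 1 with hbdef
  set e := PySem.Int.mod (se - 1) 24 + 1 with hedef
  have hbe : pvInR (b, e) := by
    simp only [pvInR, hbdef, hedef, pv_mod_emod]
    omega
  -- unfold A's first iteration: the empty seen-set never contains the start state
  have hfirst : pvALoop 25 0 PySem.Set.empty b e =
      pvALoop 24 1 [(b, e)] (pvT (b, e)).1 (pvT (b, e)).2 := by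
    rw [pvALoop]
    simp [PySem.Set.empty, PySem.Set.contains, PySem.Set.add, t_operator, pvT]
  rw [hfirst]
  have h := pv_loop_eq 24 1 [(b, e)] (b, e) (pvT (b, e))
    (by omega) (by omega) (by simp) (by simp) (by simp)
    (by intro q hq; simp at hq; subst hq; exact hbe)
    (pvT_inR _)
    (List.isChain_pair.mpr rfl)
  norm_num at h
  rw [h]
  rfl
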